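-- pv_equiv track=rewrite | github.com/FilipMilovanovic/RAG-Formula-1 | src/rag_answer.py | trim_contexts
-- ===== SOURCE A (Python) =====
-- def trim_contexts(contexts: list[str], max_chars: int = 2200) -> list[str]:
--     """
--     Ensures the final prompt stays small enough for local LLMs by
--     trimming the list of retrieved context snippets
--     """
--     out, total = [], 0
--     for c in contexts:
--         if total + len(c) + 4 > max_chars:
--             break
--         out.append(c)
--         total += len(c) + 4
--     return out
-- ===== SOURCE B (Python) =====
-- def trim_contexts(contexts: list[str], max_chars: int = 2200) -> list[str]:
--     # Prefix-sum decomposition: build cumulative costs, count how many stay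
--     # within budget, then slice.
--     prefixes = []
--     s = 0
--     for c in contexts:
--         s += len(c) + 4
--         prefixes.append(s)
--     k = sum(1 for p in prefixes if p <= max_chars)
--     return contexts[:k]
-- ===== Notes on version B (the rewrite author's own statement) =====
-- stated objective: alternative
-- what changed: Replaces the accumulate-and-break loop with a prefix-sum table, a count of prefixes within budget, and a slice (valid since each item's cost len(c)+4 is positive, making prefix sums strictly increasing).
import Mathlib
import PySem

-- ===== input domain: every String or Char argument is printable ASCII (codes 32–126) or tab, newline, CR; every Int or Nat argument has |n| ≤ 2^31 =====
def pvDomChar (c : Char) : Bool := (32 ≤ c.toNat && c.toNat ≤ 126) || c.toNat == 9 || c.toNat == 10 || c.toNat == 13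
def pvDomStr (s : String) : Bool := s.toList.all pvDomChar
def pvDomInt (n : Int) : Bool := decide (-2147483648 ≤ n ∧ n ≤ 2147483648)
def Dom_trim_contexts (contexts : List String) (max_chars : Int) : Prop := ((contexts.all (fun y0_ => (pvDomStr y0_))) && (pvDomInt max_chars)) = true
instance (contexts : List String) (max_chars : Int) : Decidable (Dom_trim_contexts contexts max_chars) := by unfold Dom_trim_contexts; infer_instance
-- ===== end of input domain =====

-- ===== PORT A =====
-- loop of A: state (out reversed implicitly by structure, total)
def trimLoop (cs : List String) (total : Int) (max_chars : Int) : List String :=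
  match cs with
  | [] => []
  | c :: rest =>
      if total + (c.length : Int) + 4 > max_chars then []
      else c :: trimLoop rest (total + (c.length : Int) + 4) max_chars

def trim_contexts (contexts : List String) (max_chars : Int) : List String :=
  trimLoop contexts 0 max_chars

-- ===== PORT B =====
-- B: cumulative costs from running total s, then count-and-slice
def altPrefixes (cs : List String) (s : Int) : List Int :=
  match cs with
  | [] => []
  | c :: rest => (s + (c.length : Int) + 4) :: altPrefixes rest (s + (c.length : Int) + 4)

def trim_contexts_alt (contexts : List String) (max_chars : Int) : List String :=
  let prefixes := altPrefixes contexts 0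
  let k := prefixes.countP (fun p => decide (p ≤ max_chars))
  contexts.take k

-- ===== PRECONDITION & SPEC =====
def Spec_trim_contexts (contexts : List String) (max_chars : Int) (out : List String) : Prop := out = trim_contexts_alt contexts max_chars
instance (contexts : List String) (max_chars : Int) (out : List String) : Decidable (Spec_trim_contexts contexts max_chars out) := by unfold Spec_trim_contexts; infer_instance

-- ===== CLAIM (what is proved, stated in full; the proofs are below) =====
def Claim_equal_trim_contexts : Prop := ∀ (contexts : List String) (max_chars : Int), Dom_trim_contexts contexts max_chars → Spec_trim_contexts contexts max_chars (trim_contexts contexts max_chars)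

-- ===== LEMMAS AND PROOFS =====

-- ===== VERDICT (by name: the statement is the Claim_ definition above) =====
lemma altPrefixes_ge (cs : List String) (s p : Int) (hp : p ∈ altPrefixes cs s) : s < p := by
  induction cs generalizing s with
  | nil => simp [altPrefixes] at hp
  | cons c rest ih =>
      simp only [altPrefixes, List.mem_cons] at hp
      rcases hp with h | h
      · have : (0:Int) ≤ (c.length : Int) := Int.natCast_nonneg _
        omega
      · have := ih _ h
        have : (0:Int) ≤ (c.length : Int) := Int.natCast_nonneg _
        omega

lemma trimLoop_eq (cs : List String) (total max_chars : Int) :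
    trimLoop cs total max_chars =
      cs.take ((altPrefixes cs total).countP (fun p => decide (p ≤ max_chars))) := by
  induction cs generalizing total with
  | nil => simp [trimLoop, altPrefixes]
  | cons c rest ih =>
      by_cases h : total + (c.length : Int) + 4 > max_chars
      · have hz : (altPrefixes (c :: rest) total).countP (fun p => decide (p ≤ max_chars)) = 0 := by
          rw [List.countP_eq_zero]
          intro p hp
          simp only [altPrefixes, List.mem_cons] at hp
          rcases hp with hp | hp
          · subst hp; simp; omega
          · have := altPrefixes_ge rest _ p hp
            simp; omega
        simp [trimLoop, h, hz]
      · rw [not_lt] at h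
        have hc : (altPrefixes (c :: rest) total).countP (fun p => decide (p ≤ max_chars)) =
            (altPrefixes rest (total + (c.length : Int) + 4)).countP (fun p => decide (p ≤ max_chars)) + 1 := by
          simp [altPrefixes, h]
        simp [trimLoop, hc, ih, not_lt.mpr h]

-- header: B builds a prefix-sum table and slices; alternative decomposition, same cost
theorem trim_contexts_spec : Claim_equal_trim_contexts := by
  intro contexts max_chars _
  unfold Spec_trim_contexts trim_contexts trim_contexts_alt
  exact trimLoop_eq contexts 0 max_chars
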